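-- pv_equiv track=rewrite | github.com/wzygxr/shuati | class139_LinearBasisAlgorithms/test_linear_basis.py | query_kth_xor
-- ===== SOURCE A (Python) =====
-- def insert_with_return(num, basis):
--     """
--     带返回值的线性基插入操作
--
--     参数:
--         num: 要插入的数字
--         basis: 线性基数组
--
--     返回:
--         bool: 是否插入成功
--     """
--     for i in range(63, -1, -1):
--         if (num >> i) & 1:
--             if basis[i] == 0:
--                 basis[i] = num
--                 return True
--             num ^= basis[i]
--     return False
--
-- def query_kth_xor(nums, k):
--     """
--     查询第k小异或和
--
--     参数:
--         nums: 数字列表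
--         k: 查询位置
--
--     返回:
--         long: 第k小异或和
--     """
--     if k <= 0:
--         raise ValueError("k must be positive")
--
--     # 初始化线性基
--     basis = [0] * 64
--     basis_size = 0
--
--     # 构建线性基
--     for num in nums:
--         if insert_with_return(num, basis):
--             basis_size += 1
--
--     # 高斯消元
--     for i in range(64):
--         for j in range(i + 1, 64):
--             if (basis[j] & (1 << i)) != 0:
--                 basis[j] ^= basis[i]
--
--     # 重新整理
--     gaussian_basis = [b for b in basis if b != 0]
--
--     # 判断是否能异或出0
--     can_get_zero = (len(gaussian_basis) != len(nums))
--
--     # 查询第k小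
--     if can_get_zero:
--         if k == 1:
--             return 0
--         k -= 1
--
--     if k > (1 << len(gaussian_basis)):
--         return -1
--
--     result = 0
--     for i in range(len(gaussian_basis)):
--         if (k & (1 << i)) != 0:
--             result ^= gaussian_basis[i]
--
--     return result
-- ===== SOURCE B (Python) =====
-- def query_kth_xor(nums, k):
--     """kth smallest xor subset sum, selected by successive halving on the raw
--     triangular basis: no Gaussian-elimination/RREF pass and no bit-of-k row
--     picking; instead walk the pivots from high to low and decide each row's
--     inclusion by comparing the remaining index with the half-count."""
--     if k <= 0:
--         raise ValueError("k must be positive")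
--     basis = [0] * 64
--     for num in nums:
--         for i in range(63, -1, -1):
--             if (num >> i) & 1:
--                 if basis[i] == 0:
--                     basis[i] = num
--                     break
--                 num ^= basis[i]
--     pivots = [i for i in range(63, -1, -1) if basis[i] != 0]  # descending
--     r = len(pivots)
--     # 0-indexed position inside the span (0 is attainable iff rank < len(nums))
--     m = k - 1 if r != len(nums) else k
--     if m >= (1 << r):
--         return -1
--     result = 0
--     half = 1 << r
--     for p in pivots:
--         half >>= 1
--         take = (result >> p) & 1  # the choice clearing bit p comes first
--         if m >= half:
--             take ^= 1
--             m -= half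
--         if take:
--             result ^= basis[p]
--     return result
-- ===== Notes on version B (the rewrite author's own statement) =====
-- stated objective: alternative
-- what changed: B drops A's 64x64 Gaussian-elimination pass and the bit-of-k row picking entirely: it selects the kth value directly on the raw triangular basis by walking the pivots from high to low and deciding each row's inclusion by comparing the remaining index against the half-count 2^j (take the branch that clears the pivot bit first), which equals A's reduced-basis bit selection because both enumerate the span in increasing order.
-- intended difference: On the single index one past the valid range (k = 2^rank + 1 when rank < len(nums), else k = 2^rank) A's off-by-one bound check lets the query through and its selection loop reads only the low rank bits of k, silently returning 0; B returns -1 there, the out-of-range answer the bound was meant to give. — e.g. on query_kth_xor([], 1): A returns 0, B returns -1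
import Mathlib
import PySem

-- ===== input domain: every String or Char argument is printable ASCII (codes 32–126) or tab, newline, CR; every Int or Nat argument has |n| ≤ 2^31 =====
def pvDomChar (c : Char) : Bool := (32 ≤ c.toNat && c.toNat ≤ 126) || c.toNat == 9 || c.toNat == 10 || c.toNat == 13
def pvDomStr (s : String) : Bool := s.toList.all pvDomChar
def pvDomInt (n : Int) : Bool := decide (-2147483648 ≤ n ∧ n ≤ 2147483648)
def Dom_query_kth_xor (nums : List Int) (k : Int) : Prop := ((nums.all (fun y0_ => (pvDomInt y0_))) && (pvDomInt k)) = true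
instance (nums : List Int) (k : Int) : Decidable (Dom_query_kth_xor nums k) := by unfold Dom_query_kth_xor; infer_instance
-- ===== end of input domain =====

-- B replaces A's Gaussian-elimination (RREF) pass and its bit-of-k row picking by a direct
-- selection on the raw triangular basis: walk the pivots from high to low and decide each
-- row's inclusion by comparing the remaining index against the half-count; objective: alternative.

-- Python's  x << i  and  x >> i  for the nonnegative shift amounts used here (core Lean's
-- <<< / >>> with a Nat amount, Python-exact arithmetic shift), named to pin the instance.
def pyShl (n : Int) (i : Nat) : Int := n <<< i
def pyShr (n : Int) (i : Nat) : Int := n >>> i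

-- ===== PORT A =====
-- Port notes: range(63,-1,-1) is the descending index list (List.range 64).reverse; every list
-- index here is 0..63 on a 64-element list, so List.getD / List.set are exact (Python's
-- IndexError is unreachable); Python's &, ^ are PySem.Int.band / PySem.Int.bxor.

def insert_with_return_go (num : Int) (basis : List Int) : List Nat → Bool × List Int
  | [] => (false, basis)
  | i :: rest =>
    if PySem.Int.band (pyShr num i) 1 ≠ 0 then
      if basis.getD i 0 = 0 then (true, basis.set i num)
      else insert_with_return_go (PySem.Int.bxor num (basis.getD i 0)) basis rest
    else insert_with_return_go num basis rest

def insert_with_return (num : Int) (basis : List Int) : Bool × List Int :=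
  insert_with_return_go num basis (List.range 64).reverse

-- the inner 'for j in range(i + 1, 64)' of A's Gaussian elimination
def gauss_inner (i : Nat) (b : List Int) : List Int :=
  (List.range' (i+1) (63-i)).foldl (fun b j =>
    if PySem.Int.band (b.getD j 0) (pyShl 1 i) ≠ 0
    then b.set j (PySem.Int.bxor (b.getD j 0) (b.getD i 0)) else b) b

-- A's code from 'if k > (1 << len(gaussian_basis))' on (k already adjusted by the zero case)
def query_kth_finish (gb : List Int) (k : Int) : Int :=
  if k > pyShl 1 gb.length then -1
  else (List.range gb.length).foldl (fun r i =>
    if PySem.Int.band k (pyShl 1 i) ≠ 0 then PySem.Int.bxor r (gb.getD i 0) else r) 0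

def query_kth_xor (nums : List Int) (k : Int) : Int :=
  -- 'if k <= 0: raise ValueError' is exactly what Pre_query_kth_xor excludes
  let st := nums.foldl (fun (st : List Int × Int) num =>
      let r := insert_with_return num st.1
      (r.2, if r.1 then st.2 + 1 else st.2)) (List.replicate 64 0, 0)
  -- st.2 is A's basis_size: computed by A but never used afterwards
  let basis2 := (List.range 64).foldl (fun b i => gauss_inner i b) st.1
  let gb := basis2.filter (fun x => x ≠ 0)
  if gb.length ≠ nums.length then
    if k = 1 then 0 else query_kth_finish gb (k - 1)
  else query_kth_finish gb k

-- ===== PORT B =====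
-- Source B's insertion loop ('for i in range(63, -1, -1): …' with break)
def insert_basis_go (num : Int) (basis : List Int) : List Nat → List Int
  | [] => basis
  | i :: rest =>
    if PySem.Int.band (pyShr num i) 1 ≠ 0 then
      if basis.getD i 0 = 0 then basis.set i num
      else insert_basis_go (PySem.Int.bxor num (basis.getD i 0)) basis rest
    else insert_basis_go num basis rest

-- body of Source B's selection loop, state (result, m, half)
def bstep (basis : List Int) (st : Int × Int × Int) (p : Nat) : Int × Int × Int :=
  let half := pyShr st.2.2 1
  let take := PySem.Int.band (pyShr st.1 p) 1
  let tm : Int × Int :=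
    if st.2.1 ≥ half then (PySem.Int.bxor take 1, st.2.1 - half) else (take, st.2.1)
  (if tm.1 ≠ 0 then PySem.Int.bxor st.1 (basis.getD p 0) else st.1, tm.2, half)

def query_kth_xor_alt (nums : List Int) (k : Int) : Int :=
  let basis := nums.foldl (fun b num => insert_basis_go num b (List.range 64).reverse)
      (List.replicate 64 0)
  let pivots := ((List.range 64).reverse).filter (fun i => basis.getD i 0 ≠ 0)
  let r := pivots.length
  let m := if r ≠ nums.length then k - 1 else k
  if m ≥ pyShl 1 r then -1
  else (pivots.foldl (bstep basis) (0, m, pyShl 1 r)).1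

-- ===== PRECONDITION & SPEC =====
-- Pre_ excludes exactly k <= 0, on which A raises ValueError.
def Pre_query_kth_xor (nums : List Int) (k : Int) : Prop := 1 ≤ k
instance (nums : List Int) (k : Int) : Decidable (Pre_query_kth_xor nums k) := by
  unfold Pre_query_kth_xor; infer_instance

def pvWitness_query_kth_xor : List Int × Int := ([3, 5, 6], 4)

-- D_'s helper: the GF(2) rank of nums over bits 0..63, an intrinsic property of the input
-- (dimension of the span), computed by D_'s own sifting recursion; it reaches neither port.
def pvSift : Nat → List Int → Int → Option (Nat × Int)
  | 0, _, _ => none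
  | i+1, rows, x =>
    if x.testBit i then
      (if rows.getD i 0 = 0 then some (i, x) else pvSift i rows (PySem.Int.bxor x (rows.getD i 0)))
    else pvSift i rows x

def pvRankOf (nums : List Int) : Nat :=
  (nums.foldl (fun rows x =>
     match pvSift 64 rows x with
     | some iv => rows.set iv.1 iv.2
     | none => rows) (List.replicate 64 0)).countP (fun v => v ≠ 0)

-- On the single index one past the valid range (k = 2^rank + 1 when rank < len(nums), else
-- k = 2^rank) A's off-by-one bound check lets the query through and its selection loop reads
-- only the low rank bits of k, silently returning 0; B returns -1 there, the out-of-range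
-- answer the bound was meant to give.
def D_query_kth_xor (nums : List Int) (k : Int) : Prop :=
  if pvRankOf nums ≠ nums.length then k = 2 ^ pvRankOf nums + 1 else k = 2 ^ pvRankOf nums
instance (nums : List Int) (k : Int) : Decidable (D_query_kth_xor nums k) := by
  unfold D_query_kth_xor; infer_instance

def Spec_query_kth_xor (nums : List Int) (k : Int) (out : Int) : Prop :=
  ¬ D_query_kth_xor nums k → out = query_kth_xor_alt nums k
instance (nums : List Int) (k : Int) (out : Int) : Decidable (Spec_query_kth_xor nums k out) := by
  unfold Spec_query_kth_xor; infer_instance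

def pvDiffWitness_query_kth_xor : List Int × Int := ([], 1)
def pvDiffWitnessOut_query_kth_xor : Int × Int := (0, -1)

-- ===== CLAIM (what is proved, stated in full; the proofs are below) =====
def Claim_unchanged_query_kth_xor : Prop := ∀ (nums : List Int) (k : Int), Dom_query_kth_xor nums k → Pre_query_kth_xor nums k → Spec_query_kth_xor nums k (query_kth_xor nums k)
def Claim_changed_query_kth_xor : Prop := Dom_query_kth_xor (pvDiffWitness_query_kth_xor.1) (pvDiffWitness_query_kth_xor.2) ∧ Pre_query_kth_xor (pvDiffWitness_query_kth_xor.1) (pvDiffWitness_query_kth_xor.2) ∧ D_query_kth_xor (pvDiffWitness_query_kth_xor.1) (pvDiffWitness_query_kth_xor.2) ∧ query_kth_xor (pvDiffWitness_query_kth_xor.1) (pvDiffWitness_query_kth_xor.2) = pvDiffWitnessOut_query_kth_xor.1 ∧ query_kth_xor_alt (pvDiffWitness_query_kth_xor.1) (pvDiffWitness_query_kth_xor.2) = pvDiffWitnessOut_query_kth_xor.2 ∧ pvDiffWitnessOut_query_kth_xor.1 ≠ pvDiffWitnessOut_query_kth_xor.2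
def Claim_exact_query_kth_xor : Prop := ∀ (nums : List Int) (k : Int), Dom_query_kth_xor nums k → Pre_query_kth_xor nums k → D_query_kth_xor nums k → query_kth_xor nums k ≠ query_kth_xor_alt nums k

-- ===== LEMMAS AND PROOFS =====

-- proof-layer view of A's elimination: reduced rows built slot by slot
def stepR (i : Nat) (ri v : Int) : Int :=
  if PySem.Int.band v (pyShl 1 i) ≠ 0 then PySem.Int.bxor v ri else v

def redBy (rs : List (Nat × Int)) (v : Int) : Int :=
  rs.foldl (fun v p => stepR p.1 p.2 v) v

def rrows (b0 : List Int) : Nat → List (Nat × Int)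
  | 0 => []
  | n+1 => rrows b0 n ++ [(n, redBy (rrows b0 n) (b0.getD n 0))]

def gstepA (n : Nat) (b : List Int) (j : Nat) : List Int :=
  if PySem.Int.band (b.getD j 0) (pyShl 1 n) ≠ 0
  then b.set j (PySem.Int.bxor (b.getD j 0) (b.getD n 0)) else b

def elimSteps (b0 : List Int) (n : Nat) : List Int :=
  (List.range n).foldl (fun b i => gauss_inner i b) b0

-- the reduced row of slot n
def gAt (b0 : List Int) (n : Nat) : Int := redBy (rrows b0 n) (b0.getD n 0)

lemma pbxor_eq (a b : Int) : PySem.Int.bxor a b = Int.xor a b := by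
  cases a with
  | ofNat m => cases b with
    | ofNat n => simp [PySem.Int.bxor, Int.xor]
    | negSucc n => simp [PySem.Int.bxor, Int.xor, Int.negSucc_eq]; omega
  | negSucc m => cases b with
    | ofNat n => simp [PySem.Int.bxor, Int.xor, Int.negSucc_eq]; omega
    | negSucc n => simp [PySem.Int.bxor, Int.xor, Int.negSucc_eq]; omega

lemma tb_bxor (a b : Int) (i : Nat) :
    (PySem.Int.bxor a b).testBit i = xor (a.testBit i) (b.testBit i) := by
  rw [pbxor_eq]; exact Int.testBit_lxor a b i

lemma tb_shr (v : Int) (i j : Nat) : (pyShr v i).testBit j = v.testBit (i + j) := by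
  cases v with
  | ofNat m =>
      show (((m >>> i : Nat) : Int)).testBit j = _
      simp [Int.testBit, Nat.testBit_shiftRight]
  | negSucc m =>
      rw [pyShr, Int.negSucc_shiftRight]
      simp [Int.testBit, Nat.testBit_shiftRight]

lemma shl_one (i : Nat) : pyShl 1 i = ((2^i : Nat) : Int) := by
  simp [pyShl, Int.shiftLeft_eq]

lemma band_two_pow (v : Int) (i : Nat) :
    PySem.Int.band v (pyShl 1 i) = if v.testBit i then ((2^i : Nat) : Int) else 0 := by
  rw [shl_one]
  cases v with
  | ofNat m =>
      have : PySem.Int.band (Int.ofNat m) ((2^i : Nat) : Int) = ((m &&& 2^i : Nat) : Int) :=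
        PySem.Int.band_natCast m (2^i)
      rw [this, Nat.and_two_pow]
      cases h : m.testBit i <;> simp [Int.testBit, h]
  | negSucc m =>
      have h0 : ¬ (0:Int) ≤ Int.negSucc m := by simp [Int.negSucc_eq]; omega
      have h1 : (0:Int) ≤ ((2^i : Nat) : Int) := by positivity
      simp only [PySem.Int.band, if_neg h0, if_pos h1]
      have h2 : (-(Int.negSucc m) - 1).toNat = m := by simp [Int.negSucc_eq]
      have h3 : (((2^i : Nat) : Int)).toNat = 2^i := Int.toNat_natCast _
      rw [h2, h3, Nat.and_comm, Nat.and_two_pow]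
      cases h : m.testBit i <;> simp [Int.testBit, h]

lemma ixor_assoc (a b c : Int) : Int.xor (Int.xor a b) c = Int.xor a (Int.xor b c) := by
  cases a <;> cases b <;> cases c <;> simp [Int.xor, Nat.xor_assoc]

lemma bxor_assoc (a b c : Int) :
    PySem.Int.bxor (PySem.Int.bxor a b) c = PySem.Int.bxor a (PySem.Int.bxor b c) := by
  simp [pbxor_eq, ixor_assoc]

lemma bxor_zero_left (a : Int) : PySem.Int.bxor 0 a = a := by
  rw [PySem.Int.bxor_comm]; exact PySem.Int.bxor_zero a

lemma mod_two_testBit (w : Int) : PySem.Int.mod w 2 = if w.testBit 0 then 1 else 0 := by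
  cases w with
  | ofNat m =>
      have h := PySem.Int.mod_natCast m 2
      rw [show PySem.Int.mod (Int.ofNat m) 2 = PySem.Int.mod ((m:Nat):Int) ((2:Nat):Int) from rfl, h]
      rcases Nat.mod_two_eq_zero_or_one m with h | h <;>
        simp [Int.testBit, Nat.testBit_zero, h]
  | negSucc m =>
      have h2 : ((Int.negSucc m).testBit 0) = !(m.testBit 0) := rfl
      rw [PySem.Int.mod_eq_emod_of_pos (by norm_num : (0:Int) < 2), h2]
      rcases Nat.mod_two_eq_zero_or_one m with h | h <;>
        simp [Nat.testBit_zero, h, Int.negSucc_eq] <;> omega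

lemma band_one_val (w : Int) : PySem.Int.band w 1 = if w.testBit 0 then 1 else 0 := by
  rw [PySem.Int.band_one, mod_two_testBit]

lemma cond_bit (v : Int) (i : Nat) :
    PySem.Int.band (pyShr v i) 1 = if v.testBit i then 1 else 0 := by
  rw [band_one_val, tb_shr]
  simp

-- xor-subset-sum of a row list selected by the bits of a Nat index (little-endian)
def FN : List Int → Nat → Int
  | [], _ => 0
  | g :: t, m => PySem.Int.bxor (if m.testBit 0 then g else 0) (FN t (m >>> 1))

-- the bits of x at the listed positions, packed little-endian
def PX : List Nat → Int → Nat
  | [], _ => 0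
  | p :: t, x => Nat.bit (x.testBit p) (PX t x)

lemma FN_zero (L : List Int) : FN L 0 = 0 := by
  induction L with
  | nil => rfl
  | cons g t ih => simp [FN, Nat.zero_testBit, ih, bxor_zero_left]

lemma FN_congr (L : List Int) : ∀ m1 m2 : Nat,
    (∀ j, j < L.length → m1.testBit j = m2.testBit j) → FN L m1 = FN L m2 := by
  induction L with
  | nil => intro _ _ _; rfl
  | cons g t ih =>
    intro m1 m2 h
    rw [FN, FN, h 0 (by simp), ih (m1 >>> 1) (m2 >>> 1) (fun j hj => by
      rw [Nat.testBit_shiftRight, Nat.testBit_shiftRight]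
      exact h (1 + j) (by simp only [List.length_cons]; omega))]

lemma FN_snoc (L : List Int) (g : Int) : ∀ m : Nat,
    FN (L ++ [g]) m = PySem.Int.bxor (FN L m) (if m.testBit L.length then g else 0) := by
  induction L with
  | nil =>
    intro m
    simp [FN, PySem.Int.bxor_zero, bxor_zero_left]
  | cons a t ih =>
    intro m
    rw [List.cons_append, FN, ih, FN, bxor_assoc, Nat.testBit_shiftRight]
    simp only [List.length_cons]
    rw [Nat.add_comm 1 t.length]
    rfl

lemma bxor_left_comm (a b c : Int) :
    PySem.Int.bxor a (PySem.Int.bxor b c) = PySem.Int.bxor b (PySem.Int.bxor a c) := by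
  rw [← bxor_assoc, PySem.Int.bxor_comm a b, bxor_assoc]

lemma bxor_cancel_left (a b : Int) : PySem.Int.bxor a (PySem.Int.bxor a b) = b := by
  rw [← bxor_assoc, PySem.Int.bxor_self, bxor_zero_left]

lemma FN_xor (L : List Int) : ∀ a b : Nat,
    FN L (a ^^^ b) = PySem.Int.bxor (FN L a) (FN L b) := by
  induction L with
  | nil => intro a b; simp [FN, PySem.Int.bxor_zero]
  | cons g t ih =>
    intro a b
    rw [FN, FN, FN, Nat.shiftRight_xor_distrib, ih, Nat.testBit_xor]
    cases h1 : a.testBit 0 <;> cases h2 : b.testBit 0 <;>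
      simp [bxor_zero_left, PySem.Int.bxor_zero, bxor_assoc, bxor_left_comm,
        bxor_cancel_left, PySem.Int.bxor_self]

lemma FN_two_pow (L : List Int) : FN L (2 ^ L.length) = 0 := by
  induction L with
  | nil => simp [FN]
  | cons g t ih =>
    rw [FN]
    have h0 : (2 ^ (g :: t).length).testBit 0 = false := by
      simp [Nat.testBit_zero, List.length_cons, pow_succ]
    have h1 : (2 ^ (g :: t).length) >>> 1 = 2 ^ t.length := by
      rw [Nat.shiftRight_one, List.length_cons, pow_succ]
      omega
    rw [h0, h1, ih]
    simp [bxor_zero_left]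

lemma PX_lt (L : List Nat) (x : Int) : PX L x < 2 ^ L.length := by
  induction L with
  | nil => simp [PX]
  | cons p t ih =>
    have : Nat.bit (x.testBit p) (PX t x) ≤ 2 * PX t x + 1 := by
      cases x.testBit p <;> simp [Nat.bit] <;> omega
    calc PX (p :: t) x ≤ 2 * PX t x + 1 := this
    _ < 2 ^ (p :: t).length := by rw [List.length_cons, pow_succ]; omega

lemma PX_zero_of (L : List Nat) (x : Int) (h : ∀ p ∈ L, x.testBit p = false) : PX L x = 0 := by
  induction L with
  | nil => rfl
  | cons p t ih =>
    rw [PX, h p (by simp), ih (fun q hq => h q (by simp [hq]))]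
    rfl

lemma PX_zero_x (L : List Nat) : PX L 0 = 0 :=
  PX_zero_of L 0 (fun p _ => Nat.zero_testBit p)

lemma bit_xor_bit (b1 b2 : Bool) (n1 n2 : Nat) :
    Nat.bit b1 n1 ^^^ Nat.bit b2 n2 = Nat.bit (xor b1 b2) (n1 ^^^ n2) := by
  apply Nat.eq_of_testBit_eq
  intro i
  cases i with
  | zero => simp [Nat.testBit_xor, Nat.testBit_bit_zero]
  | succ j => simp [Nat.testBit_xor, Nat.testBit_bit_succ]

lemma PX_xor (L : List Nat) (u v : Int) :
    PX L (PySem.Int.bxor u v) = PX L u ^^^ PX L v := by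
  induction L with
  | nil => simp [PX]
  | cons p t ih => rw [PX, PX, PX, bit_xor_bit, tb_bxor, ih]

lemma PX_snoc (L : List Nat) (p : Nat) (x : Int) :
    PX (L ++ [p]) x = PX L x + (if x.testBit p then 2 ^ L.length else 0) := by
  induction L with
  | nil => cases h : x.testBit p <;> simp [PX, Nat.bit, h]
  | cons q t ih =>
    rw [List.cons_append, PX, ih, PX]
    cases h : x.testBit q <;> cases h2 : x.testBit p <;>
      simp [Nat.bit, List.length_cons, pow_succ] <;> omega
lemma length_rrows (b0 : List Int) (n : Nat) : (rrows b0 n).length = n := by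
  induction n with
  | zero => rfl
  | succ n ih => simp [rrows, ih]

lemma redBy_nil (v : Int) : redBy [] v = v := rfl

lemma redBy_cons (p : Nat × Int) (t : List (Nat × Int)) (v : Int) :
    redBy (p :: t) v = redBy t (stepR p.1 p.2 v) := rfl

lemma redBy_append_single (rs : List (Nat × Int)) (p : Nat × Int) (v : Int) :
    redBy (rs ++ [p]) v = stepR p.1 p.2 (redBy rs v) := by
  simp [redBy]

lemma stepR_zero (i : Nat) (v : Int) : stepR i 0 v = v := by
  simp [stepR]

lemma redBy_filter (rs : List (Nat × Int)) (v : Int) :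
    redBy (rs.filter (fun p => decide (p.2 ≠ 0))) v = redBy rs v := by
  induction rs generalizing v with
  | nil => rfl
  | cons p t ih =>
    rw [List.filter_cons]
    by_cases h : p.2 = 0
    · rw [if_neg (by simp [h]), ih, redBy_cons, h, stepR_zero]
    · rw [if_pos (by simpa using h), redBy_cons, redBy_cons, ih]

lemma set_append_len (p s : List Int) (c x : Int) :
    (p ++ c :: s).set p.length x = p ++ x :: s := by
  induction p with
  | nil => rfl
  | cons a t ih => simp [ih]

lemma gstepA_append (n : Nat) (p s : List Int) (c : Int) (hn : n < p.length) :
    gstepA n (p ++ c :: s) p.length = p ++ stepR n (p.getD n 0) c :: s := by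
  have hget : (p ++ c :: s).getD p.length 0 = c := by
    rw [List.getD_append_right p (c :: s) 0 p.length le_rfl]; simp
  have hgetn : (p ++ c :: s).getD n 0 = p.getD n 0 := List.getD_append p (c :: s) 0 n hn
  rw [gstepA, stepR, hget, hgetn]
  split_ifs with h
  · rw [set_append_len]
  · rfl

lemma gauss_inner_gen (n : Nat) (m : Nat) : ∀ (p s : List Int), n < p.length → m ≤ s.length →
    ((List.range' p.length m).foldl (gstepA n) (p ++ s))
    = p ++ (s.take m).map (stepR n (p.getD n 0)) ++ s.drop m := by
  induction m with
  | zero => intro p s _ _; simp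
  | succ m ih =>
    intro p s hn hm
    cases s with
    | nil => simp at hm
    | cons c s' =>
      rw [List.range'_succ, List.foldl_cons, gstepA_append n p s' c hn]
      have h1 : p ++ stepR n (p.getD n 0) c :: s'
          = (p ++ [stepR n (p.getD n 0) c]) ++ s' := by simp
      have h2 : p.length + 1 = (p ++ [stepR n (p.getD n 0) c]).length := by simp
      rw [h1, h2, ih (p ++ [stepR n (p.getD n 0) c]) s'
          (by simp only [List.length_append, List.length_cons, List.length_nil]; omega)
          (by simp only [List.length_cons] at hm; omega)]
      have h3 : (p ++ [stepR n (p.getD n 0) c]).getD n 0 = p.getD n 0 :=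
        List.getD_append p [stepR n (p.getD n 0) c] 0 n hn
      rw [h3]
      simp

lemma gauss_inner_spec (n : Nat) (b : List Int) (hb : b.length = 64) (hn : n < 64) :
    gauss_inner n b = b.take (n+1) ++ (b.drop (n+1)).map (stepR n (b.getD n 0)) := by
  have hp : (b.take (n+1)).length = n + 1 := by rw [List.length_take, hb]; omega
  have hs : (b.drop (n+1)).length = 63 - n := by rw [List.length_drop, hb]; omega
  have hgetn : (b.take (n+1)).getD n 0 = b.getD n 0 := by
    rw [List.getD_eq_getElem _ _ (by rw [hp]; omega), List.getD_eq_getElem _ _ (by omega)]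
    simp
  have hmain := gauss_inner_gen n (63 - n) (b.take (n+1)) (b.drop (n+1))
      (by rw [hp]; omega) (le_of_eq hs.symm)
  rw [hp, List.take_append_drop] at hmain
  have hdef : gauss_inner n b = (List.range' (n+1) (63-n)).foldl (gstepA n) b := rfl
  rw [hdef, hmain, hgetn, List.take_of_length_le (le_of_eq hs),
      List.drop_eq_nil_of_le (le_of_eq hs)]
  simp

lemma elim_invariant (b0 : List Int) (hb : b0.length = 64) :
    ∀ n, n ≤ 64 → elimSteps b0 n
      = (rrows b0 n).map Prod.snd ++ (b0.drop n).map (fun v => redBy (rrows b0 n) v) := by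
  intro n
  induction n with
  | zero => intro _; simp [elimSteps, rrows, redBy_nil]
  | succ n ih =>
    intro hn
    have hn' : n < 64 := by omega
    have hE := ih (by omega)
    have hlen : (elimSteps b0 (n+1)) = gauss_inner n (elimSteps b0 n) := by
      rw [elimSteps, elimSteps, List.range_succ, List.foldl_append, List.foldl_cons, List.foldl_nil]
    rw [hlen, hE]
    set P := (rrows b0 n).map Prod.snd with hP
    have hPlen : P.length = n := by simp [hP, length_rrows]
    have hdrop : b0.drop n = b0[n] :: b0.drop (n+1) := List.drop_eq_getElem_cons (by omega)
    have hget : b0.getD n 0 = b0[n] := List.getD_eq_getElem b0 0 (by omega)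
    set r := redBy (rrows b0 n) (b0.getD n 0) with hr
    have hEeq : (b0.drop n).map (fun v => redBy (rrows b0 n) v)
        = r :: (b0.drop (n+1)).map (fun v => redBy (rrows b0 n) v) := by
      rw [hdrop, List.map_cons, hr, hget]
    rw [hEeq]
    have hElen : (P ++ r :: (b0.drop (n+1)).map (fun v => redBy (rrows b0 n) v)).length = 64 := by
      simp only [List.length_append, List.length_cons, List.length_map, List.length_drop, hPlen, hb]
      omega
    rw [gauss_inner_spec n _ hElen hn']
    have htake : (P ++ r :: (b0.drop (n+1)).map (fun v => redBy (rrows b0 n) v)).take (n+1)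
        = P ++ [r] := by
      rw [List.take_append, List.take_of_length_le (by omega), hPlen]
      simp
    have hdrop2 : (P ++ r :: (b0.drop (n+1)).map (fun v => redBy (rrows b0 n) v)).drop (n+1)
        = (b0.drop (n+1)).map (fun v => redBy (rrows b0 n) v) := by
      rw [List.drop_append, List.drop_eq_nil_of_le (by omega), hPlen]
      simp
    have hgetE : (P ++ r :: (b0.drop (n+1)).map (fun v => redBy (rrows b0 n) v)).getD n 0 = r := by
      rw [← hPlen, List.getD_append_right _ _ _ _ le_rfl]
      simp
    rw [htake, hdrop2, hgetE]
    have hrrows : rrows b0 (n+1) = rrows b0 n ++ [(n, r)] := rfl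
    rw [hrrows, List.map_append, ← hP, List.map_map,
        show (fun v => redBy (rrows b0 n ++ [(n, r)]) v)
          = (stepR n r ∘ fun v => redBy (rrows b0 n) v) from
        funext fun v => redBy_append_single _ _ _]
    simp

lemma insert_go_eq (l : List Nat) : ∀ (num : Int) (basis : List Int),
    insert_basis_go num basis l = (insert_with_return_go num basis l).2 := by
  induction l with
  | nil => intro num basis; rfl
  | cons i t ih =>
    intro num basis
    rw [insert_basis_go, insert_with_return_go]
    split_ifs <;> simp [ih]

lemma basis_fold_eq (nums : List Int) : ∀ (b : List Int) (s : Int),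
    (nums.foldl (fun (st : List Int × Int) num =>
       let r := insert_with_return num st.1
       (r.2, if r.1 then st.2 + 1 else st.2)) (b, s)).1
    = nums.foldl (fun b num => insert_basis_go num b (List.range 64).reverse) b := by
  induction nums with
  | nil => intro b s; rfl
  | cons x t ih =>
    intro b s
    rw [List.foldl_cons, List.foldl_cons,
        show insert_basis_go x b (List.range 64).reverse
          = (insert_with_return_go x b (List.range 64).reverse).2 from insert_go_eq _ _ _]
    exact ih _ _

lemma length_insert_go (l : List Nat) : ∀ (num : Int) (basis : List Int),
    (insert_basis_go num basis l).length = basis.length := by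
  induction l with
  | nil => intro num basis; rfl
  | cons i t ih =>
    intro num basis
    rw [insert_basis_go]
    split_ifs <;> simp [ih]

lemma length_basis_fold (nums : List Int) : ∀ (b : List Int),
    (nums.foldl (fun b num => insert_basis_go num b (List.range 64).reverse) b).length
      = b.length := by
  induction nums with
  | nil => intro b; rfl
  | cons x t ih =>
    intro b
    rw [List.foldl_cons, ih, length_insert_go]
lemma getD_set_self (b : List Int) (i : Nat) (x : Int) (h : i < b.length) :
    (b.set i x).getD i 0 = x := by
  rw [List.getD_eq_getElem _ _ (by simpa using h)]
  simp

lemma getD_set_ne (b : List Int) (i j : Nat) (x : Int) (h : j ≠ i) :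
    (b.set i x).getD j 0 = b.getD j 0 := by
  by_cases hj : j < b.length
  · rw [List.getD_eq_getElem _ _ (by simpa using hj), List.getD_eq_getElem _ _ hj]
    rw [List.getElem_set_ne (by omega)]
  · rw [List.getD_eq_default _ _ (by simpa using hj), List.getD_eq_default _ _ (by omega)]

-- the triangular invariant of the insertion basis
def BasisOK (b : List Int) : Prop :=
  b.length = 64 ∧ ∀ i, i < 64 → b.getD i 0 = 0 ∨
    ((b.getD i 0).testBit i = true ∧ ∀ j, i < j → j ≤ 63 → (b.getD i 0).testBit j = false)

lemma range_rev_succ (n : Nat) : (List.range (n+1)).reverse = n :: (List.range n).reverse := by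
  rw [List.range_succ]
  simp

lemma cond_bit_iff (v : Int) (i : Nat) :
    (PySem.Int.band (pyShr v i) 1 ≠ 0) ↔ v.testBit i = true := by
  rw [cond_bit]
  cases v.testBit i <;> simp

lemma ins_ok : ∀ (i : Nat), i ≤ 64 → ∀ (num : Int) (b : List Int), BasisOK b →
    (∀ j, i ≤ j → j ≤ 63 → num.testBit j = false) →
    BasisOK (insert_basis_go num b ((List.range i).reverse)) := by
  intro i
  induction i with
  | zero => intro _ num b hb _; simpa [insert_basis_go] using hb
  | succ i ih =>
    intro hi num b hb hnum
    rw [range_rev_succ, insert_basis_go]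
    by_cases hc : PySem.Int.band (pyShr num i) 1 ≠ 0
    · rw [if_pos hc]
      have htb : num.testBit i = true := (cond_bit_iff num i).mp hc
      by_cases hz : b.getD i 0 = 0
      · rw [if_pos hz]
        refine ⟨by simpa using hb.1, ?_⟩
        intro i' hi'
        by_cases hii : i' = i
        · rw [hii]
          right
          have hl : i < b.length := by rw [hb.1]; omega
          rw [getD_set_self _ _ _ hl]
          exact ⟨htb, fun j hj1 hj2 => hnum j (by omega) hj2⟩
        · rw [getD_set_ne _ _ _ _ hii]
          exact hb.2 i' hi'
      · rw [if_neg hz]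
        refine ih (by omega) _ b hb ?_
        intro j hj1 hj2
        rcases Nat.eq_or_lt_of_le hj1 with rfl | h
        · rcases hb.2 i (by omega) with h0 | ⟨hd, _⟩
          · exact absurd h0 hz
          · rw [tb_bxor, htb, hd]
            rfl
        · rcases hb.2 i (by omega) with h0 | ⟨_, hh⟩
          · exact absurd h0 hz
          · rw [tb_bxor, hnum j (by omega) hj2, hh j (by omega) hj2]
            rfl
    · rw [if_neg hc]
      refine ih (by omega) _ b hb ?_
      intro j hj1 hj2
      rcases Nat.eq_or_lt_of_le hj1 with rfl | h
      · cases h' : num.testBit i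
        · rfl
        · exact absurd ((cond_bit_iff num i).mpr h') hc
      · exact hnum j (by omega) hj2

lemma b0_ok (nums : List Int) : ∀ (b : List Int), BasisOK b →
    BasisOK (nums.foldl (fun b num => insert_basis_go num b (List.range 64).reverse) b) := by
  induction nums with
  | nil => intro b hb; exact hb
  | cons x t ih =>
    intro b hb
    rw [List.foldl_cons]
    exact ih _ (ins_ok 64 le_rfl x b hb (fun j hj1 hj2 => by omega))

lemma replicate_ok : BasisOK (List.replicate 64 (0 : Int)) := by
  refine ⟨by simp, ?_⟩
  intro i hi
  left
  exact List.getD_replicate 0 hi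

lemma stepR_cond_iff (q : Nat) (v : Int) :
    (PySem.Int.band v (pyShl 1 q) ≠ 0) ↔ v.testBit q = true := by
  rw [band_two_pow]
  cases v.testBit q <;> simp [pow_pos]

lemma redBy_zero (Ps : List (Nat × Int)) : redBy Ps 0 = 0 := by
  induction Ps with
  | nil => rfl
  | cons p t ih =>
    rw [redBy_cons, stepR, if_neg (by simp [band_two_pow, Nat.zero_testBit, Int.testBit])]
    exact ih

lemma redBy_keep_high (j : Nat) : ∀ (Ps : List (Nat × Int)) (v : Int),
    (∀ pr ∈ Ps, pr.2.testBit j = false) → (redBy Ps v).testBit j = v.testBit j := by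
  intro Ps
  induction Ps with
  | nil => intro v _; rfl
  | cons p t ih =>
    intro v h
    rw [redBy_cons, ih _ (fun pr hpr => h pr (by simp [hpr])), stepR]
    split_ifs with hc
    · rw [tb_bxor, h p (by simp)]
      cases v.testBit j <;> rfl
    · rfl

lemma rrows_eq_map (b0 : List Int) (n : Nat) :
    rrows b0 n = (List.range n).map (fun q => (q, gAt b0 q)) := by
  induction n with
  | zero => rfl
  | succ n ih =>
    rw [rrows, ih, List.range_succ, List.map_append]
    simp [gAt, ih]

lemma gAt_zero (b0 : List Int) (n : Nat) (h : b0.getD n 0 = 0) : gAt b0 n = 0 := by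
  rw [gAt, h, redBy_zero]

lemma gAt_high (b0 : List Int) (hOK : BasisOK b0) :
    ∀ n, n < 64 → ∀ j, n < j → j ≤ 63 → (gAt b0 n).testBit j = false := by
  intro n
  induction n using Nat.strong_induction_on with
  | _ n ih =>
    intro hn j hj1 hj2
    rw [gAt, redBy_keep_high j]
    · rcases hOK.2 n hn with h0 | ⟨_, hh⟩
      · rw [h0]; exact Nat.zero_testBit j
      · exact hh j hj1 hj2
    · intro pr hpr
      rw [rrows_eq_map] at hpr
      simp only [List.mem_map, List.mem_range] at hpr
      obtain ⟨q, hq, rfl⟩ := hpr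
      by_cases hz : b0.getD q 0 = 0
      · rw [gAt_zero _ _ hz]; exact Nat.zero_testBit j
      · exact ih q hq (by omega) j (by omega) hj2

lemma gAt_diag (b0 : List Int) (hOK : BasisOK b0) (n : Nat) (hn : n < 64)
    (hz : b0.getD n 0 ≠ 0) : (gAt b0 n).testBit n = true := by
  rw [gAt, redBy_keep_high n]
  · rcases hOK.2 n hn with h0 | ⟨hd, _⟩
    · exact absurd h0 hz
    · exact hd
  · intro pr hpr
    rw [rrows_eq_map] at hpr
    simp only [List.mem_map, List.mem_range] at hpr
    obtain ⟨q, hq, rfl⟩ := hpr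
    by_cases hzq : b0.getD q 0 = 0
    · rw [gAt_zero _ _ hzq]; exact Nat.zero_testBit n
    · exact gAt_high b0 hOK q (by omega) n hq (by omega)

lemma gAt_ne_zero (b0 : List Int) (hOK : BasisOK b0) (n : Nat) (hn : n < 64)
    (hz : b0.getD n 0 ≠ 0) : gAt b0 n ≠ 0 := by
  intro h
  have := gAt_diag b0 hOK n hn hz
  rw [h] at this
  simpa [Int.testBit] using this

-- ascending pivot list below n
def ascP (b0 : List Int) (n : Nat) : List Nat :=
  (List.range n).filter (fun i => decide (b0.getD i 0 ≠ 0))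

lemma rrows_filter (b0 : List Int) (hOK : BasisOK b0) (n : Nat) (hn : n ≤ 64) :
    (rrows b0 n).filter (fun pr => decide (pr.2 ≠ 0))
      = (ascP b0 n).map (fun q => (q, gAt b0 q)) := by
  rw [rrows_eq_map, List.filter_map, ascP]
  congr 1
  apply List.filter_congr
  intro q hq
  simp only [List.mem_range] at hq
  simp only [Function.comp]
  by_cases hz : b0.getD q 0 = 0
  · simp [gAt_zero _ _ hz, hz]
    exact hz
  · simp [gAt_ne_zero b0 hOK q (by omega) hz, hz]
    exact hz

lemma bit_shr_one (b : Bool) (n : Nat) : (Nat.bit b n) >>> 1 = n := by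
  cases b <;> simp [Nat.bit, Nat.shiftRight_one] <;> omega

lemma redBy_asc (b0 : List Int) (hOK : BasisOK b0) : ∀ (Q : List Nat) (v : Int),
    Q.Pairwise (· < ·) → (∀ q ∈ Q, q < 64 ∧ b0.getD q 0 ≠ 0) →
    redBy (Q.map (fun q => (q, gAt b0 q))) v
      = PySem.Int.bxor v (FN (Q.map (gAt b0)) (PX Q v)) := by
  intro Q
  induction Q with
  | nil => intro v _ _; simp [redBy_nil, FN, PySem.Int.bxor_zero]
  | cons q T ih =>
    intro v hpair hmem
    have hqT : ∀ q' ∈ T, q < q' := fun q' hq' => (List.pairwise_cons.mp hpair).1 q' hq'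
    have hgq_clean : PX T (gAt b0 q) = 0 := by
      apply PX_zero_of
      intro p hp
      by_cases hz : b0.getD q 0 = 0
      · rw [gAt_zero _ _ hz]; exact Nat.zero_testBit p
      · exact gAt_high b0 hOK q (hmem q (by simp)).1 p (hqT p hp)
          (by have := (hmem p (by simp [hp])).1; omega)
    rw [List.map_cons, redBy_cons, stepR]
    have hPX : PX (q :: T) v = Nat.bit (v.testBit q) (PX T v) := rfl
    have hFN : FN ((q :: T).map (gAt b0)) (PX (q :: T) v)
        = PySem.Int.bxor (if v.testBit q then gAt b0 q else 0) (FN (T.map (gAt b0)) (PX T v)) := by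
      rw [List.map_cons, FN, hPX, Nat.testBit_bit_zero, bit_shr_one]
    rw [hFN]
    by_cases hc : v.testBit q = true
    · rw [if_pos ((stepR_cond_iff q v).mpr hc)]
      rw [ih _ ((List.pairwise_cons.mp hpair).2) (fun p hp => hmem p (by simp [hp]))]
      rw [PX_xor, hgq_clean, Nat.xor_zero, hc, if_pos rfl]
      show PySem.Int.bxor (PySem.Int.bxor v (gAt b0 q)) _ = _
      rw [bxor_assoc]
    · rw [if_neg (by rw [stepR_cond_iff]; exact hc)]
      rw [ih _ ((List.pairwise_cons.mp hpair).2) (fun p hp => hmem p (by simp [hp]))]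
      rw [if_neg (by simp [hc]), bxor_zero_left]

-- gAt at a pivot in terms of the lower reduced rows: the RREF relation
lemma gAt_rel (b0 : List Int) (hOK : BasisOK b0) (p : Nat) (hp : p ≤ 64) :
    gAt b0 p = PySem.Int.bxor (b0.getD p 0)
      (FN ((ascP b0 p).map (gAt b0)) (PX (ascP b0 p) (b0.getD p 0))) := by
  have h1 : gAt b0 p = redBy (rrows b0 p) (b0.getD p 0) := rfl
  rw [h1, ← redBy_filter, rrows_filter b0 hOK p hp]
  refine redBy_asc b0 hOK _ _ ?_ ?_
  · exact List.Pairwise.filter _ (List.pairwise_lt_range)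
  · intro q hq
    rw [ascP, List.mem_filter, List.mem_range] at hq
    exact ⟨by omega, by simpa using hq.2⟩

-- the descending pivot chain
def Chain (b0 : List Int) : List Nat → Prop
  | [] => True
  | p :: t => p < 64 ∧ b0.getD p 0 ≠ 0 ∧ t.reverse = ascP b0 p ∧ Chain b0 t

def descFrom (b0 : List Int) (n : Nat) : List Nat :=
  ((List.range n).reverse).filter (fun i => decide (b0.getD i 0 ≠ 0))

lemma descFrom_eq_rev (b0 : List Int) (n : Nat) :
    descFrom b0 n = (ascP b0 n).reverse := by
  rw [descFrom, ascP, List.filter_reverse]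

lemma descFrom_succ (b0 : List Int) (n : Nat) :
    descFrom b0 (n+1) = if b0.getD n 0 ≠ 0 then n :: descFrom b0 n else descFrom b0 n := by
  rw [descFrom, range_rev_succ, List.filter_cons]
  split_ifs with h h2 h3 <;> simp_all [descFrom]

lemma chain_descFrom (b0 : List Int) : ∀ n, n ≤ 64 → Chain b0 (descFrom b0 n) := by
  intro n
  induction n with
  | zero => intro _; trivial
  | succ n ih =>
    intro hn
    rw [descFrom_succ]
    split_ifs with h
    · exact ⟨by omega, h, by rw [descFrom_eq_rev, List.reverse_reverse], ih (by omega)⟩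
    · exact ih (by omega)

lemma tb_natCast (m : Nat) (i : Nat) : ((m : Int)).testBit i = m.testBit i := rfl

lemma tb_top (m r : Nat) (h : m < 2^(r+1)) : m.testBit r = decide (2^r ≤ m) := by
  rw [Nat.testBit_eq_decide_div_mod_eq]
  rcases Nat.lt_or_ge m (2^r) with h1 | h1
  · rw [Nat.div_eq_of_lt h1]
    simp [h1]
  · have h2 : m / 2^r = 1 := by
      have hlt : m / 2^r < 2 := by
        rw [Nat.div_lt_iff_lt_mul (by positivity)]
        rw [pow_succ] at h
        omega
      have hge : 1 ≤ m / 2^r := (Nat.one_le_div_iff (by positivity)).mpr h1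
      omega
    rw [h2]
    simp [h1]

lemma tb_add_pow_low (u n j : Nat) (hu : u < 2^n) (hj : j < n) :
    (u + 2^n).testBit j = u.testBit j := by
  rw [Nat.testBit_eq_decide_div_mod_eq, Nat.testBit_eq_decide_div_mod_eq]
  have h1 : (u + 2^n) / 2^j = u / 2^j + 2^(n-j) := by
    rw [show (2:Nat)^n = 2^(n-j) * 2^j by rw [← pow_add]; congr 1; omega]
    rw [Nat.add_mul_div_right _ _ (by positivity)]
  rw [h1]
  have h2 : (2:Nat)^(n-j) % 2 = 0 := by
    have : 1 ≤ n - j := by omega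
    rcases Nat.exists_eq_add_of_le this with ⟨c, hc⟩
    rw [hc, pow_add, pow_one]
    omega
  generalize u / 2^j = a
  simp only [decide_eq_decide]
  omega

lemma tb_add_pow_self (u n : Nat) (hu : u < 2^n) : (u + 2^n).testBit n = true := by
  rw [Nat.testBit_eq_decide_div_mod_eq]
  have h1 : (u + 2^n) / 2^n = 1 := by
    rw [Nat.add_div_right _ (by positivity), Nat.div_eq_of_lt hu]
  rw [h1]
  rfl

-- A's selection loop computes FN
lemma selA (gb : List Int) : ∀ (m : Nat) (acc : Int),
    (List.range gb.length).foldl (fun r i =>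
      if PySem.Int.band ((m:Int)) (pyShl 1 i) ≠ 0 then PySem.Int.bxor r (gb.getD i 0) else r) acc
    = PySem.Int.bxor acc (FN gb m) := by
  induction gb with
  | nil => intro m acc; simp [FN, PySem.Int.bxor_zero]
  | cons g t ih =>
    intro m acc
    rw [List.length_cons, List.range_succ_eq_map, List.foldl_cons, List.foldl_map]
    have hstep : ∀ (r : Int) (i : Nat),
        (if PySem.Int.band ((m:Int)) (pyShl 1 (i+1)) ≠ 0
         then PySem.Int.bxor r ((g :: t).getD (i+1) 0) else r)
        = (if PySem.Int.band (((m >>> 1 : Nat) : Int)) (pyShl 1 i) ≠ 0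
           then PySem.Int.bxor r (t.getD i 0) else r) := by
      intro r i
      have hc : (PySem.Int.band ((m:Int)) (pyShl 1 (i+1)) ≠ 0)
          ↔ (PySem.Int.band (((m >>> 1 : Nat) : Int)) (pyShl 1 i) ≠ 0) := by
        rw [stepR_cond_iff, stepR_cond_iff, tb_natCast, tb_natCast,
            Nat.testBit_shiftRight, Nat.add_comm]
      rw [if_congr hc rfl rfl]
      rfl
    rw [funext (fun r => funext (hstep r)), ih]
    have hc0 : (PySem.Int.band ((m:Int)) (pyShl 1 0) ≠ 0) ↔ m.testBit 0 = true := by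
      rw [stepR_cond_iff, tb_natCast]
    rw [FN]
    by_cases h0 : m.testBit 0 = true
    · rw [if_pos (hc0.mpr h0), if_pos h0]
      show _ = PySem.Int.bxor acc (PySem.Int.bxor g (FN t (m >>> 1)))
      rw [← bxor_assoc]
      rfl
    · rw [if_neg (fun hh => h0 (hc0.mp hh)), if_neg h0, bxor_zero_left]


-- one greedy step absorbed into the FN form (the heart of the equivalence)
lemma bridge_core (b0 : List Int) (hOK : BasisOK b0) (p : Nat) (d' : List Nat)
    (hp64 : p < 64) (hasc : d'.reverse = ascP b0 p)
    (x : Int) (m : Nat) (hm : m < 2 ^ (d'.length + 1)) :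
    PySem.Int.bxor
      (if xor (x.testBit p) (decide (2^d'.length ≤ m)) then PySem.Int.bxor x (b0.getD p 0) else x)
      (FN (d'.reverse.map (gAt b0))
        ((m - (if 2^d'.length ≤ m then 2^d'.length else 0)) ^^^
          PX d'.reverse
            (if xor (x.testBit p) (decide (2^d'.length ≤ m)) then PySem.Int.bxor x (b0.getD p 0) else x)))
      = PySem.Int.bxor x
          (FN ((d'.reverse ++ [p]).map (gAt b0)) (m ^^^ PX (d'.reverse ++ [p]) x)) := by
  have hAlen : (d'.reverse.map (gAt b0)).length = d'.length := by simp
  have hrevlen : d'.reverse.length = d'.length := by simp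
  have hPXlt : PX d'.reverse x < 2^d'.length := by
    have := PX_lt d'.reverse x
    rwa [hrevlen] at this
  have hgat : gAt b0 p = PySem.Int.bxor (b0.getD p 0)
      (FN (d'.reverse.map (gAt b0)) (PX d'.reverse (b0.getD p 0))) := by
    have := gAt_rel b0 hOK p (by omega)
    rwa [← hasc] at this
  rw [List.map_append, List.map_cons, List.map_nil, FN_snoc, hAlen]
  have hPXsnoc : PX (d'.reverse ++ [p]) x
      = PX d'.reverse x + (if x.testBit p then 2^d'.length else 0) := by
    have := PX_snoc d'.reverse p x
    rwa [hrevlen] at this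
  rw [hPXsnoc]
  have hStop : (m ^^^ (PX d'.reverse x + if x.testBit p then 2^d'.length else 0)).testBit d'.length
      = xor (decide (2^d'.length ≤ m)) (x.testBit p) := by
    rw [Nat.testBit_xor, tb_top m d'.length hm]
    cases hxc : x.testBit p
    · simp [Nat.testBit_lt_two_pow hPXlt]
    · simp [tb_add_pow_self _ _ hPXlt]
  rw [hStop]
  have hSlow : FN (d'.reverse.map (gAt b0))
        (m ^^^ (PX d'.reverse x + if x.testBit p then 2^d'.length else 0))
      = FN (d'.reverse.map (gAt b0))
        ((m - (if 2^d'.length ≤ m then 2^d'.length else 0)) ^^^ PX d'.reverse x) := by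
    apply FN_congr
    intro j hj
    rw [hAlen] at hj
    rw [Nat.testBit_xor, Nat.testBit_xor]
    have e1 : (PX d'.reverse x + if x.testBit p then 2^d'.length else 0).testBit j
        = (PX d'.reverse x).testBit j := by
      cases hxc : x.testBit p
      · simp
      · simp only [if_pos rfl]
        exact tb_add_pow_low _ _ _ hPXlt hj
    have e2 : m.testBit j = (m - (if 2^d'.length ≤ m then 2^d'.length else 0)).testBit j := by
      by_cases hm2 : 2^d'.length ≤ m
      · rw [if_pos hm2]
        have hlt : m - 2^d'.length < 2^d'.length := by
          rw [pow_succ] at hm; omega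
        rw [show m = (m - 2^d'.length) + 2^d'.length by omega,
            tb_add_pow_low _ _ _ hlt hj]
        congr 1
        omega
      · simp [hm2]
    rw [e1, e2]
  rw [hSlow]
  by_cases hm2 : 2^d'.length ≤ m
  · cases hxc : x.testBit p
    · -- tk = true : include the row
      simp only [hxc, hm2, decide_true, Bool.false_xor, Bool.true_xor, Bool.xor_true,
        Bool.xor_false, Bool.not_true, Bool.not_false, if_true, if_false, ite_true, ite_false,
        Bool.false_eq_true, if_pos hm2]
      rw [PX_xor, ← Nat.xor_assoc, FN_xor, hgat]
      simp [bxor_assoc, bxor_left_comm, PySem.Int.bxor_comm]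
    · -- tk = false
      simp only [hxc, hm2, decide_true, Bool.true_xor, Bool.xor_true, Bool.not_true,
        if_true, if_false, ite_true, ite_false, Bool.false_eq_true, if_pos hm2]
      rw [PySem.Int.bxor_zero]
  · cases hxc : x.testBit p
    · -- tk = false
      simp only [hxc, hm2, decide_false, Bool.false_xor, Bool.xor_false,
        if_true, if_false, ite_true, ite_false, Bool.false_eq_true, if_neg hm2]
      rw [PySem.Int.bxor_zero]
    · -- tk = true
      simp only [hxc, hm2, decide_false, Bool.true_xor, Bool.xor_false, Bool.not_false,
        if_true, if_false, ite_true, ite_false, Bool.false_eq_true, if_neg hm2]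
      rw [PX_xor, ← Nat.xor_assoc, FN_xor, hgat]
      simp [bxor_assoc, bxor_left_comm, PySem.Int.bxor_comm]

lemma natCast_shr (a : Nat) (i : Nat) : pyShr ((a : Nat) : Int) i = ((a >>> i : Nat) : Int) := rfl

lemma pow_shr_one (r : Nat) : ((2:Nat)^(r+1)) >>> 1 = 2^r := by
  rw [Nat.shiftRight_one, pow_succ]
  omega

-- the greedy selection on the triangular basis equals FN on the reduced rows
lemma bridge (b0 : List Int) (hOK : BasisOK b0) : ∀ (d : List Nat), Chain b0 d →
    ∀ (x : Int) (m : Nat), m < 2 ^ d.length →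
    (d.foldl (bstep b0) (x, (m : Int), ((2 ^ d.length : Nat) : Int))).1
      = PySem.Int.bxor x (FN (d.reverse.map (gAt b0)) (m ^^^ PX d.reverse x)) := by
  intro d
  induction d with
  | nil =>
    intro _ x m hm
    simp [FN, PySem.Int.bxor_zero]
  | cons p d' ih =>
    intro hch x m hm
    obtain ⟨hp64, hpnz, hasc, hch'⟩ := hch
    rw [List.length_cons] at hm
    have hstep : bstep b0 (x, (m : Int), ((2 ^ (p :: d').length : Nat) : Int)) p
        = ((if xor (x.testBit p) (decide (2^d'.length ≤ m))
            then PySem.Int.bxor x (b0.getD p 0) else x),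
           ((m - (if 2^d'.length ≤ m then 2^d'.length else 0) : Nat) : Int),
           ((2^d'.length : Nat) : Int)) := by
      show bstep b0 (x, (m : Int), ((2 ^ (d'.length + 1) : Nat) : Int)) p = _
      rw [bstep]
      simp only [natCast_shr, pow_shr_one, cond_bit]
      have hcond : (((m:Int)) ≥ ((2^d'.length : Nat) : Int)) ↔ 2^d'.length ≤ m := by
        exact_mod_cast Iff.rfl
      by_cases hm2 : 2^d'.length ≤ m
      · rw [if_pos (hcond.mpr hm2)]
        cases hxc : x.testBit p
        · simp only [if_false, Bool.false_xor, hm2, decide_true, if_true, ite_true, ite_false,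
            Bool.false_eq_true]
          simp only [Prod.mk.injEq]
          refine ⟨by rw [if_pos (show PySem.Int.bxor 0 1 ≠ 0 by decide)], (Nat.cast_sub hm2).symm, trivial⟩
        · simp only [if_true, Bool.true_xor, hm2, decide_true, Bool.not_true,
            Bool.false_eq_true, ite_true, ite_false]
          simp only [Prod.mk.injEq]
          refine ⟨by rw [if_neg (show ¬ PySem.Int.bxor 1 1 ≠ 0 by decide)], (Nat.cast_sub hm2).symm, trivial⟩
      · rw [if_neg (fun h => hm2 (hcond.mp h))]
        cases hxc : x.testBit p
        · simp only [hm2, decide_false, Bool.xor_false, Bool.false_eq_true, ite_true, ite_false,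
            if_false]
          simp only [Prod.mk.injEq]
          refine ⟨by rw [if_neg (show ¬ ((0:Int) ≠ 0) by decide)], by norm_num, trivial⟩
        · simp only [hm2, decide_false, Bool.xor_false, ite_true, ite_false]
          simp only [Prod.mk.injEq]
          refine ⟨by rw [if_pos (show ((1:Int) ≠ 0) by decide)], by norm_num, trivial⟩
    rw [List.foldl_cons, hstep]
    have hm'lt : m - (if 2^d'.length ≤ m then 2^d'.length else 0) < 2^d'.length := by
      by_cases hm2 : 2^d'.length ≤ m <;> simp [hm2] <;> [skip; skip] <;> omega
    rw [ih hch' _ _ hm'lt, List.reverse_cons]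
    exact bridge_core b0 hOK p d' hp64 hasc x m (by omega)

lemma pvSift_eq : ∀ (i : Nat) (rows : List Int) (x : Int),
    (match pvSift i rows x with
     | some iv => rows.set iv.1 iv.2
     | none => rows) = insert_basis_go x rows ((List.range i).reverse) := by
  intro i
  induction i with
  | zero => intro rows x; rfl
  | succ i ih =>
    intro rows x
    rw [range_rev_succ, insert_basis_go, pvSift]
    by_cases hc : x.testBit i
    · rw [if_pos hc, if_pos ((cond_bit_iff x i).mpr hc)]
      by_cases hz : rows.getD i 0 = 0
      · rw [if_pos hz, if_pos hz]
      · rw [if_neg hz, if_neg hz, ih]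
    · rw [if_neg hc, if_neg (fun h => hc ((cond_bit_iff x i).mp h)), ih]

lemma countP_filter_range : ∀ (b : List Int),
    ((List.range b.length).filter (fun i => decide (b.getD i 0 ≠ 0))).length
      = b.countP (fun v => decide (v ≠ 0)) := by
  intro b
  induction b with
  | nil => rfl
  | cons x t ih =>
    rw [List.length_cons, List.range_succ_eq_map, List.filter_cons, List.filter_map,
        List.countP_cons]
    have h1 : ((List.range t.length).filter
        ((fun i => decide ((x :: t).getD i 0 ≠ 0)) ∘ Nat.succ)).length
        = t.countP (fun v => decide (v ≠ 0)) := by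
      rw [← ih]
      congr 1
    by_cases hx : x ≠ 0
    · rw [if_pos (by simpa using hx)]
      simp only [List.length_cons, List.length_map]
      rw [h1]
      simp [hx]
    · rw [if_neg (by simpa using hx)]
      simp only [List.length_map]
      rw [h1]
      simp at hx
      simp [hx]

lemma rank_eq (nums : List Int) :
    pvRankOf nums = (ascP (nums.foldl (fun b num => insert_basis_go num b (List.range 64).reverse)
      (List.replicate 64 0)) 64).length := by
  set b0 := nums.foldl (fun b num => insert_basis_go num b (List.range 64).reverse)
      (List.replicate 64 0) with hb0
  have hlen : b0.length = 64 := by rw [hb0, length_basis_fold]; simp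
  have h1 : pvRankOf nums = b0.countP (fun v => decide (v ≠ 0)) := by
    rw [pvRankOf,
      show (fun (rows : List Int) (x : Int) =>
          match pvSift 64 rows x with
          | some iv => rows.set iv.1 iv.2
          | none => rows)
        = (fun (rows : List Int) (x : Int) => insert_basis_go x rows (List.range 64).reverse) from
        funext fun rows => funext fun x => pvSift_eq 64 rows x]
  rw [h1, ascP, ← hlen, ← countP_filter_range]

lemma descFrom_len (b0 : List Int) : (descFrom b0 64).length = (ascP b0 64).length := by
  rw [descFrom_eq_rev, List.length_reverse]

lemma greedy_FN (b0 : List Int) (hOK : BasisOK b0) (mN : Nat)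
    (hmN : mN < 2 ^ (ascP b0 64).length) :
    ((descFrom b0 64).foldl (bstep b0) (0, ((mN : Nat) : Int), pyShl 1 (ascP b0 64).length)).1
      = FN ((ascP b0 64).map (gAt b0)) mN := by
  have hdlen : (descFrom b0 64).length = (ascP b0 64).length := descFrom_len b0
  have h := bridge b0 hOK (descFrom b0 64) (chain_descFrom b0 64 le_rfl) 0 mN
      (by rw [hdlen]; exact hmN)
  rw [hdlen] at h
  rw [shl_one, h, descFrom_eq_rev, List.reverse_reverse, PX_zero_x, Nat.xor_zero,
      bxor_zero_left]

lemma finish_FN (gvals : List Int) (k' : Int) (mN : Nat) (hcast : k' = ((mN : Nat) : Int)) :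
    ¬ k' > pyShl 1 gvals.length →
    query_kth_finish gvals k' = FN gvals mN := by
  intro hgt
  rw [query_kth_finish, if_neg hgt, hcast, selA gvals mN 0, bxor_zero_left]

-- the full equivalence outside the boundary index
lemma main_eq (nums : List Int) (k : Int) (hPre : 1 ≤ k)
    (hnD : ¬ (if pvRankOf nums ≠ nums.length then k = 2 ^ pvRankOf nums + 1
              else k = 2 ^ pvRankOf nums)) :
    query_kth_xor nums k = query_kth_xor_alt nums k := by
  simp only [query_kth_xor, query_kth_xor_alt]
  rw [basis_fold_eq]
  set b0 := nums.foldl (fun b num => insert_basis_go num b (List.range 64).reverse)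
      (List.replicate 64 0) with hb0
  have hOK : BasisOK b0 := b0_ok nums _ replicate_ok
  have hlen : b0.length = 64 := hOK.1
  have helim : (List.range 64).foldl (fun b i => gauss_inner i b) b0
      = (rrows b0 64).map Prod.snd := by
    have h := elim_invariant b0 hlen 64 le_rfl
    rw [elimSteps] at h
    rw [h, List.drop_eq_nil_of_le (by omega)]
    simp
  rw [helim]
  have hq : ((fun (x : Int) => decide (x ≠ 0)) ∘ (Prod.snd : Nat × Int → Int))
      = (fun (pr : Nat × Int) => decide (pr.2 ≠ 0)) := rfl
  have hfil : ((rrows b0 64).map Prod.snd).filter (fun x => decide (x ≠ 0))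
      = (ascP b0 64).map (gAt b0) := by
    rw [List.filter_map, hq, rrows_filter b0 hOK 64 le_rfl, List.map_map]
    rfl
  rw [hfil]
  have hpiv : ((List.range 64).reverse).filter (fun i => decide (b0.getD i 0 ≠ 0))
      = descFrom b0 64 := rfl
  rw [hpiv]
  rw [rank_eq nums, ← hb0] at hnD
  rw [descFrom_len b0]
  simp only [List.length_map]
  set R := (ascP b0 64).length with hR
  have hpow_cast : ((2:Int)^R) = ((2^R : Nat) : Int) := by push_cast; ring
  have hpow_pos : (1:Int) ≤ ((2^R : Nat) : Int) := by
    have : (1:Nat) ≤ 2^R := Nat.one_le_two_pow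
    exact_mod_cast this
  have hglen : (List.map (gAt b0) (ascP b0 64)).length = R := by
    rw [List.length_map]
  by_cases hz : R ≠ nums.length
  · simp only [if_pos hz]
    rw [if_pos hz] at hnD
    by_cases hk1 : k = 1
    · rw [if_pos hk1, hk1]
      rw [show ((1:Int) - 1) = ((0:Nat):Int) from by norm_num]
      rw [if_neg (by rw [shl_one]; intro h; exact absurd (le_trans hpow_pos h) (by norm_num))]
      rw [greedy_FN b0 hOK 0 (by positivity), FN_zero]
    · rw [if_neg hk1]
      have hne : k - 1 ≠ ((2^R : Nat) : Int) := by
        intro h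
        exact hnD (by rw [hpow_cast]; omega)
      by_cases hgt : k - 1 > ((2^R : Nat) : Int)
      · rw [query_kth_finish, if_pos (by rw [hglen, shl_one]; exact hgt)]
        rw [if_pos (by rw [shl_one]; omega)]
      · have hlt : k - 1 < ((2^R : Nat) : Int) := by omega
        have hnn : (0:Int) ≤ k - 1 := by omega
        set mN := (k - 1).toNat with hmN
        have hcast : k - 1 = ((mN : Nat) : Int) := (Int.toNat_of_nonneg hnn).symm
        have hmlt : mN < 2^R := by omega
        rw [finish_FN _ _ mN hcast (by rw [hglen, shl_one]; exact hgt)]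
        rw [if_neg (by rw [shl_one]; omega)]
        rw [hcast, greedy_FN b0 hOK mN hmlt]
  · simp only [if_neg hz]
    rw [if_neg hz] at hnD
    have hne : k ≠ ((2^R : Nat) : Int) := by
      intro h
      exact hnD (by rw [hpow_cast]; omega)
    by_cases hgt : k > ((2^R : Nat) : Int)
    · rw [query_kth_finish, if_pos (by rw [hglen, shl_one]; exact hgt)]
      rw [if_pos (by rw [shl_one]; omega)]
    · have hlt : k < ((2^R : Nat) : Int) := by omega
      have hnn : (0:Int) ≤ k := by omega
      set mN := k.toNat with hmN
      have hcast : k = ((mN : Nat) : Int) := (Int.toNat_of_nonneg hnn).symm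
      have hmlt : mN < 2^R := by omega
      rw [finish_FN _ _ mN hcast (by rw [hglen, shl_one]; exact hgt)]
      rw [if_neg (by rw [shl_one]; omega)]
      rw [hcast, greedy_FN b0 hOK mN hmlt]

-- inside D_: A returns 0 (the selection reads only the low rank bits of 2^rank), B returns -1
lemma tight_eq (nums : List Int) (k : Int) (hPre : 1 ≤ k)
    (hD : if pvRankOf nums ≠ nums.length then k = 2 ^ pvRankOf nums + 1
          else k = 2 ^ pvRankOf nums) :
    query_kth_xor nums k = 0 ∧ query_kth_xor_alt nums k = -1 := by
  simp only [query_kth_xor, query_kth_xor_alt]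
  rw [basis_fold_eq]
  set b0 := nums.foldl (fun b num => insert_basis_go num b (List.range 64).reverse)
      (List.replicate 64 0) with hb0
  have hOK : BasisOK b0 := b0_ok nums _ replicate_ok
  have hlen : b0.length = 64 := hOK.1
  have helim : (List.range 64).foldl (fun b i => gauss_inner i b) b0
      = (rrows b0 64).map Prod.snd := by
    have h := elim_invariant b0 hlen 64 le_rfl
    rw [elimSteps] at h
    rw [h, List.drop_eq_nil_of_le (by omega)]
    simp
  rw [helim]
  have hq : ((fun (x : Int) => decide (x ≠ 0)) ∘ (Prod.snd : Nat × Int → Int))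
      = (fun (pr : Nat × Int) => decide (pr.2 ≠ 0)) := rfl
  have hfil : ((rrows b0 64).map Prod.snd).filter (fun x => decide (x ≠ 0))
      = (ascP b0 64).map (gAt b0) := by
    rw [List.filter_map, hq, rrows_filter b0 hOK 64 le_rfl, List.map_map]
    rfl
  rw [hfil]
  have hpiv : ((List.range 64).reverse).filter (fun i => decide (b0.getD i 0 ≠ 0))
      = descFrom b0 64 := rfl
  rw [hpiv]
  rw [rank_eq nums, ← hb0] at hD
  rw [descFrom_len b0]
  simp only [List.length_map]
  set R := (ascP b0 64).length with hR
  have hpow_cast : ((2:Int)^R) = ((2^R : Nat) : Int) := by push_cast; ring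
  have hpow_pos : (1:Int) ≤ ((2^R : Nat) : Int) := by
    have : (1:Nat) ≤ 2^R := Nat.one_le_two_pow
    exact_mod_cast this
  have hglen : (List.map (gAt b0) (ascP b0 64)).length = R := by
    rw [List.length_map]
  have hFNtop : FN (List.map (gAt b0) (ascP b0 64)) (2^R) = 0 := by
    rw [← hglen, FN_two_pow]
  by_cases hz : R ≠ nums.length
  · simp only [if_pos hz]
    rw [if_pos hz] at hD
    have hcast : k - 1 = ((2^R : Nat) : Int) := by rw [hpow_cast] at hD; omega
    have hk1 : k ≠ 1 := by
      intro h
      rw [h] at hcast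
      omega
    constructor
    · rw [if_neg hk1]
      rw [finish_FN _ _ (2^R) hcast (by rw [hglen, shl_one]; omega), hFNtop]
    · rw [if_pos (by rw [shl_one]; omega)]
  · simp only [if_neg hz]
    rw [if_neg hz] at hD
    have hcast : k = ((2^R : Nat) : Int) := by rw [hpow_cast] at hD; omega
    constructor
    · rw [finish_FN _ _ (2^R) hcast (by rw [hglen, shl_one]; omega), hFNtop]
    · rw [if_pos (by rw [shl_one]; omega)]

-- ===== VERDICT (by name: the statement is the Claim_ definition above) =====
theorem query_kth_xor_spec : Claim_unchanged_query_kth_xor := by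
  intro nums k _hDom hPre
  unfold Spec_query_kth_xor
  intro hnD
  unfold D_query_kth_xor at hnD
  unfold Pre_query_kth_xor at hPre
  exact main_eq nums k hPre hnD

theorem query_kth_xor_changed : Claim_changed_query_kth_xor := by
  unfold Claim_changed_query_kth_xor
  have hd : (if pvRankOf ([] : List Int) ≠ ([] : List Int).length
      then (1:Int) = 2 ^ pvRankOf ([] : List Int) + 1
      else (1:Int) = 2 ^ pvRankOf ([] : List Int)) := by decide
  have h := tight_eq [] 1 le_rfl hd
  exact ⟨by decide, by decide, by decide, h.1, h.2, by decide⟩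

theorem query_kth_xor_tight : Claim_exact_query_kth_xor := by
  intro nums k _hDom hPre hD
  unfold D_query_kth_xor at hD
  unfold Pre_query_kth_xor at hPre
  have h := tight_eq nums k hPre hD
  rw [h.1, h.2]
  decide
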